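-- pv_equiv track=rewrite | github.com/anetczuk/BluetoothGattMitm | src/btgattmitm/servicemock.py | _extractBits
-- ===== SOURCE A (Python) =====
-- def _extractBits(number):
--     ret = []
--     bit = 1
--     while number >= bit:
--         if number & bit:
--             ret.append(bit)
--         bit <<= 1
--     return ret
-- ===== SOURCE B (Python) =====
-- def _extractBits(number):
--     # Recursive halving: the lowest bit from the parity, then the bits of the halved number, doubled.
--     if number <= 0:
--         return []
--     rest = [2 * b for b in _extractBits(number // 2)]
--     return ([1] + rest) if number % 2 else rest
-- ===== Notes on version B (the rewrite author's own statement) =====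
-- stated objective: alternative
-- what changed: Replaces the iterative bit-probing loop (doubling a mask and testing number & bit) with a recursive halving decomposition: take the lowest bit from the parity, recurse on the halved number and double the returned bits.
import Mathlib
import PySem

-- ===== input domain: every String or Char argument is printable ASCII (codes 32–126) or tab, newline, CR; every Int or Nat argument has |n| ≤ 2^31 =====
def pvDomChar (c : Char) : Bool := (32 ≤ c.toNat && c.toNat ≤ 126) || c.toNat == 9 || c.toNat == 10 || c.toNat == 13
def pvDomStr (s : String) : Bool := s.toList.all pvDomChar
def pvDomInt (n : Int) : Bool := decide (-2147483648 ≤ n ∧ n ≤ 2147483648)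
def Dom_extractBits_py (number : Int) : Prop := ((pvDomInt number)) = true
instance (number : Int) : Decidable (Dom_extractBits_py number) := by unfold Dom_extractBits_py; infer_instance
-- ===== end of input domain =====

-- B replaces A's doubling-mask loop by a recursive halving decomposition (take the lowest
-- bit from the parity, recurse on the halved number, double the returned bits); objective: alternative.

-- ===== PORT A =====
-- while number >= bit: if number & bit: ret.append(bit); bit <<= 1
-- (the extra `0 < bit` guard only makes the recursion total; bit starts at 1 and doubles)
def extractBitsLoopA (number : Int) (bit : Nat) (ret : List Int) : List Int :=
  if h : 0 < bit ∧ (bit : Int) ≤ number then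
    extractBitsLoopA number (bit <<< 1)
      (if PySem.Int.band number (bit : Int) ≠ 0 then ret ++ [(bit : Int)] else ret)
  else ret
termination_by number.toNat + 1 - bit
decreasing_by
  simp only [Nat.shiftLeft_eq]
  have h1 : (bit : Int) ≤ number := h.2
  omega

def extractBits_py (number : Int) : List Int := extractBitsLoopA number 1 []

-- ===== PORT B =====
def extractBits_py_alt (number : Int) : List Int :=
  if _hle : number ≤ 0 then []
  else
    let rest := (extractBits_py_alt (PySem.Int.floordiv number 2)).map (fun b => 2 * b)
    if PySem.Int.mod number 2 ≠ 0 then 1 :: rest else rest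
termination_by number.toNat
decreasing_by
  have he : PySem.Int.floordiv number 2 = number / 2 :=
    PySem.Int.floordiv_eq_ediv_of_pos (by omega)
  omega

-- ===== PRECONDITION & SPEC =====
def Spec_extractBits_py (number : Int) (out : List Int) : Prop := out = extractBits_py_alt number
instance (number : Int) (out : List Int) : Decidable (Spec_extractBits_py number out) := by unfold Spec_extractBits_py; infer_instance

-- ===== CLAIM (what is proved, stated in full; the proofs are below) =====
def Claim_equal_extractBits_py : Prop := ∀ (number : Int), Dom_extractBits_py number → Spec_extractBits_py number (extractBits_py number)

-- ===== LEMMAS AND PROOFS =====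

-- B on non-positive input is []
lemma alt_nonpos {number : Int} (h : number ≤ 0) : extractBits_py_alt number = [] := by
  rw [extractBits_py_alt]; simp [h]

-- B's unfolding on positive input
lemma alt_pos {number : Int} (h : 0 < number) :
    extractBits_py_alt number =
      (if PySem.Int.mod number 2 ≠ 0 then [(1 : Int)] else []) ++
        (extractBits_py_alt (PySem.Int.floordiv number 2)).map (fun b => 2 * b) := by
  rw [extractBits_py_alt, dif_neg (by omega : ¬ number ≤ 0)]
  split <;> simp

-- the bit test `n & 2^k` is the parity of `n >> k`
lemma nat_band_parity (n k : Nat) : n &&& 2 ^ k ≠ 0 ↔ n / 2 ^ k % 2 ≠ 0 := by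
  by_cases hb : n / 2 ^ k % 2 = 1
  · simp [Nat.and_two_pow, Nat.testBit_eq_decide_div_mod_eq, hb]
  · have h0 : n / 2 ^ k % 2 = 0 := by omega
    simp [Nat.and_two_pow, Nat.testBit_eq_decide_div_mod_eq, h0]

-- rescaling B's doubled bits by the next mask
lemma map_double_pow (k : Nat) (L : List Int) :
    L.map (fun b => ((2 ^ (k + 1) : Nat) : Int) * b) =
      (L.map (fun b => 2 * b)).map (fun b => ((2 ^ k : Nat) : Int) * b) := by
  rw [List.map_map]
  apply List.map_congr_left
  intro b _
  simp only [Function.comp]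
  push_cast [pow_succ]
  ring

-- main loop invariant: A's loop from mask 2^k produces B's bits of number // 2^k, scaled by 2^k
lemma loop_invariant (m : Nat) :
    ∀ (number : Int) (k : Nat) (ret : List Int),
      (PySem.Int.floordiv number ((2 ^ k : Nat) : Int)).toNat ≤ m →
      extractBitsLoopA number (2 ^ k) ret =
        ret ++ (extractBits_py_alt (PySem.Int.floordiv number ((2 ^ k : Nat) : Int))).map
          (fun b => ((2 ^ k : Nat) : Int) * b) := by
  induction m with
  | zero =>
    intro number k ret hm
    have hpos : (0 : Int) < ((2 ^ k : Nat) : Int) := by positivity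
    have hq : PySem.Int.floordiv number ((2 ^ k : Nat) : Int) ≤ 0 := by omega
    have hlt : number < ((2 ^ k : Nat) : Int) := by
      by_contra hge
      have : (1 : Int) ≤ PySem.Int.floordiv number ((2 ^ k : Nat) : Int) :=
        (PySem.Int.le_floordiv_iff_mul_le (a := number) (q := 1) hpos).2 (by omega)
      omega
    rw [extractBitsLoopA, dif_neg (fun hc => absurd hc.2 (not_le.mpr hlt)), alt_nonpos hq,
      List.map_nil, List.append_nil]
  | succ m ih =>
    intro number k ret hm
    have hpos : (0 : Int) < ((2 ^ k : Nat) : Int) := by positivity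
    by_cases hq : 0 < PySem.Int.floordiv number ((2 ^ k : Nat) : Int)
    · have hge : ((2 ^ k : Nat) : Int) ≤ number := by
        have := (PySem.Int.le_floordiv_iff_mul_le (a := number) (q := 1) hpos).1 (by omega)
        omega
      obtain ⟨n, rfl⟩ : ∃ n : Nat, number = (n : Int) := ⟨number.toNat, by omega⟩
      rw [PySem.Int.floordiv_natCast] at hq hm ⊢
      simp only [Int.toNat_natCast] at hm
      have hq' : 0 < n / 2 ^ k := by exact_mod_cast hq
      have hstep : PySem.Int.floordiv (n : Int) ((2 ^ (k + 1) : Nat) : Int) =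
          ((n / 2 ^ k / 2 : Nat) : Int) := by
        rw [PySem.Int.floordiv_natCast, Nat.div_div_eq_div_mul, pow_succ]
      have hqm : (PySem.Int.floordiv (n : Int) ((2 ^ (k + 1) : Nat) : Int)).toNat ≤ m := by
        rw [hstep, Int.toNat_natCast]
        have := Nat.div_lt_self hq' (by omega : 1 < 2)
        omega
      have hsh : (2 ^ k) <<< 1 = 2 ^ (k + 1) := by simp [Nat.shiftLeft_eq, pow_succ]
      have hfd : PySem.Int.floordiv ((n / 2 ^ k : Nat) : Int) 2 = ((n / 2 ^ k / 2 : Nat) : Int) := by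
        exact_mod_cast PySem.Int.floordiv_natCast (n / 2 ^ k) 2
      have hmd : PySem.Int.mod ((n / 2 ^ k : Nat) : Int) 2 = ((n / 2 ^ k % 2 : Nat) : Int) := by
        exact_mod_cast PySem.Int.mod_natCast (n / 2 ^ k) 2
      conv_rhs => rw [alt_pos (show (0 : Int) < ((n / 2 ^ k : Nat) : Int) by exact_mod_cast hq'),
        hfd, hmd]
      rw [extractBitsLoopA, dif_pos ⟨by positivity, hge⟩, hsh, ih _ (k + 1) _ hqm, hstep,
        PySem.Int.band_natCast]
      by_cases hodd : n / 2 ^ k % 2 = 0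
      · have hband : n &&& 2 ^ k = 0 := by
          by_contra hc
          exact (nat_band_parity n k).1 hc hodd
        rw [if_neg (show ¬ ((n &&& 2 ^ k : Nat) : Int) ≠ 0 by simp [hband]),
          if_neg (show ¬ ((n / 2 ^ k % 2 : Nat) : Int) ≠ 0 by simp [hodd]),
          map_double_pow, List.nil_append]
      · have hband : n &&& 2 ^ k ≠ 0 := (nat_band_parity n k).2 hodd
        rw [if_pos (show ((n &&& 2 ^ k : Nat) : Int) ≠ 0 by exact_mod_cast hband),
          if_pos (show ((n / 2 ^ k % 2 : Nat) : Int) ≠ 0 by exact_mod_cast hodd),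
          List.map_append, map_double_pow, List.map_cons, List.map_nil, mul_one,
          List.append_assoc, List.singleton_append]
    · have hlt : number < ((2 ^ k : Nat) : Int) := by
        by_contra hge
        have : (1 : Int) ≤ PySem.Int.floordiv number ((2 ^ k : Nat) : Int) :=
          (PySem.Int.le_floordiv_iff_mul_le (a := number) (q := 1) hpos).2 (by omega)
        omega
      rw [extractBitsLoopA, dif_neg (fun hc => absurd hc.2 (not_le.mpr hlt)),
        alt_nonpos (by omega : PySem.Int.floordiv number ((2 ^ k : Nat) : Int) ≤ 0),
        List.map_nil, List.append_nil]

-- ===== VERDICT (by name: the statement is the Claim_ definition above) =====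
theorem extractBits_py_spec : Claim_equal_extractBits_py := by
  intro number _
  unfold Spec_extractBits_py extractBits_py
  have h1 : PySem.Int.floordiv number (((2 ^ 0 : Nat) : Int)) = number := by
    rw [show (((2 ^ 0 : Nat) : Int)) = (1 : Int) from rfl,
      PySem.Int.floordiv_eq_ediv_of_pos (by omega : (0 : Int) < 1), Int.ediv_one]
  have h := loop_invariant number.toNat number 0 []
  rw [h1] at h
  have h2 := h (by omega)
  rw [show (2 ^ 0 : Nat) = 1 from rfl] at h2
  simpa using h2
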